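-- pv_equiv track=rewrite | github.com/mohan-ai-labs/secret-scan-360 | src/ss360/classify/rules.py | _has_sequential_pattern
-- ===== SOURCE A (Python) =====
-- def _has_sequential_pattern(text: str) -> bool:
--     """Check for sequential character patterns."""
--     if len(text) < 6:  # Require longer sequences
--         return False
--
--     # Check for ascending sequences (abc, 123) - need at least 4 in a row
--     ascending_count = 0
--     for i in range(len(text) - 1):
--         if ord(text[i + 1]) == ord(text[i]) + 1:
--             ascending_count += 1
--         else:
--             ascending_count = 0
--         if ascending_count >= 4:  # Increased threshold
--             return True
--
--     return False
-- ===== SOURCE B (Python) =====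
-- def _has_sequential_pattern(text: str) -> bool:
--     """Check for sequential character patterns."""
--     if len(text) < 6:  # Require longer sequences
--         return False
--     codes = [ord(c) for c in text]
--     # any fully-ascending 5-char window, windows taken by zipping shifted views
--     return any(
--         b == a + 1 and c == b + 1 and d == c + 1 and e == d + 1
--         for a, b, c, d, e in zip(codes, codes[1:], codes[2:], codes[3:], codes[4:])
--     )
-- ===== Notes on version B (the rewrite author's own statement) =====
-- stated objective: idiomatic
-- what changed: Replaces the stateful single pass that maintains a running ascending_count with an any() over all 5-character windows (obtained by zipping four shifted code lists), each window tested independently for being fully ascending.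
import Mathlib
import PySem

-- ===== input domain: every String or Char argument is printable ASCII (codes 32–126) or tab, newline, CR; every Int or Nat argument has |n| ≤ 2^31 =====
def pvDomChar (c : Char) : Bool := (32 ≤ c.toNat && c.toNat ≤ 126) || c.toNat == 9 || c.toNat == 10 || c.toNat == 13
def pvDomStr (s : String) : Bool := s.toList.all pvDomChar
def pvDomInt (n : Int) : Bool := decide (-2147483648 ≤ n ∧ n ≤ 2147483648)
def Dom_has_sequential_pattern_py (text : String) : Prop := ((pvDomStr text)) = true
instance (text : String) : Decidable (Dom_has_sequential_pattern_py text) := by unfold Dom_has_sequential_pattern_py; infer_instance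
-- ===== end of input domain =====

-- B replaces A's running-count pass by an independent test of every 5-char window (zip of shifted code lists); same results, idiomatic.

-- ===== PORT A =====
-- A's for-loop over i with ascending_count, comparing ord(text[i+1]) with ord(text[i])+1,
-- as the structural recursion over the remaining characters carrying the same count.
def pvLoopA : List Char → Nat → Bool
  | a :: b :: rest, cnt =>
    if ((b.toNat : Int) == (a.toNat : Int) + 1) then
      if cnt + 1 ≥ 4 then true else pvLoopA (b :: rest) (cnt + 1)
    else pvLoopA (b :: rest) 0
  | _, _ => false

def has_sequential_pattern_py (text : String) : Bool :=
  if PySem.Str.len text < 6 then false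
  else pvLoopA text.toList 0

-- ===== PORT B =====
def has_sequential_pattern_py_alt (text : String) : Bool :=
  if PySem.Str.len text < 6 then false
  else
    let codes : List Int := text.toList.map (fun ch => (ch.toNat : Int))
    (((((codes.zip (codes.drop 1)).zip (codes.drop 2)).zip (codes.drop 3)).zip (codes.drop 4)).any
      (fun q => (q.1.1.1.2 == q.1.1.1.1 + 1) && (q.1.1.2 == q.1.1.1.2 + 1)
              && (q.1.2 == q.1.1.2 + 1) && (q.2 == q.1.2 + 1)))

-- ===== PRECONDITION & SPEC =====
def Spec_has_sequential_pattern_py (text : String) (out : Bool) : Prop := out = has_sequential_pattern_py_alt text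
instance (text : String) (out : Bool) : Decidable (Spec_has_sequential_pattern_py text out) := by unfold Spec_has_sequential_pattern_py; infer_instance

-- ===== CLAIM (what is proved, stated in full; the proofs are below) =====
def Claim_equal_has_sequential_pattern_py : Prop := ∀ (text : String), Dom_has_sequential_pattern_py text → Spec_has_sequential_pattern_py text (has_sequential_pattern_py text)

-- ===== LEMMAS AND PROOFS =====

-- window recursion on raw codes (the shape B's zip-any computes)
def pvWinI : List Int → Bool
  | a :: b :: c :: d :: e :: rest =>
    ((b == a + 1) && (c == b + 1) && (d == c + 1) && (e == d + 1)) || pvWinI (b :: c :: d :: e :: rest)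
  | _ => false

-- same window recursion on chars
def pvWinC : List Char → Bool
  | a :: b :: c :: d :: e :: rest =>
    (((b.toNat : Int) == (a.toNat : Int) + 1) && ((c.toNat : Int) == (b.toNat : Int) + 1)
      && ((d.toNat : Int) == (c.toNat : Int) + 1) && ((e.toNat : Int) == (d.toNat : Int) + 1))
    || pvWinC (b :: c :: d :: e :: rest)
  | _ => false

-- "the first n adjacent pairs from the head are ascending"
def pvRunN : Nat → List Char → Bool
  | 0, _ => true
  | n + 1, a :: b :: rest => ((b.toNat : Int) == (a.toNat : Int) + 1) && pvRunN n (b :: rest)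
  | _ + 1, _ => false

def pvZip5Any (codes : List Int) : Bool :=
  (((((codes.zip (codes.drop 1)).zip (codes.drop 2)).zip (codes.drop 3)).zip (codes.drop 4)).any
    (fun q => (q.1.1.1.2 == q.1.1.1.1 + 1) && (q.1.1.2 == q.1.1.1.2 + 1)
            && (q.1.2 == q.1.1.2 + 1) && (q.2 == q.1.2 + 1)))

lemma pvZip5Any_eq_winI : ∀ cs : List Int, pvZip5Any cs = pvWinI cs := by
  intro cs
  induction cs using pvWinI.induct with
  | case1 a b c d e rest ih =>
    simp only [pvZip5Any, pvWinI, List.drop, List.zip_cons_cons, List.any_cons] at *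
    rw [← ih]
  | case2 cs h =>
    match cs, h with
    | [], _ => rfl
    | [a], _ => rfl
    | [a, b], _ => rfl
    | [a, b, c], _ => rfl
    | [a, b, c, d], _ => rfl
    | a :: b :: c :: d :: e :: rest, h => exact absurd rfl (h a b c d e rest)

lemma pvWinC_eq_winI_map : ∀ l : List Char, pvWinI (l.map (fun ch => (ch.toNat : Int))) = pvWinC l := by
  intro l
  induction l using pvWinC.induct with
  | case1 a b c d e rest ih =>
    simp only [List.map_cons] at ih
    simp only [List.map, pvWinI, pvWinC]
    rw [ih]
  | case2 l h =>
    match l, h with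
    | [], _ => rfl
    | [a], _ => rfl
    | [a, b], _ => rfl
    | [a, b, c], _ => rfl
    | [a, b, c, d], _ => rfl
    | a :: b :: c :: d :: e :: rest, h => exact absurd rfl (h a b c d e rest)

lemma pvRunN_succ_imp : ∀ (n : Nat) (l : List Char), pvRunN (n + 1) l = true → pvRunN n l = true := by
  intro n
  induction n with
  | zero => intro l _; rfl
  | succ m ih =>
    intro l h
    match l with
    | a :: b :: rest =>
      simp only [pvRunN, Bool.and_eq_true] at h ⊢
      exact ⟨h.1, ih _ h.2⟩

lemma pvRunN_four_imp : ∀ (n : Nat) (l : List Char), n ≤ 4 → pvRunN 4 l = true → pvRunN n l = true := by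
  intro n l hn h4
  interval_cases n
  · rfl
  · exact pvRunN_succ_imp _ _ (pvRunN_succ_imp _ _ (pvRunN_succ_imp _ _ h4))
  · exact pvRunN_succ_imp _ _ (pvRunN_succ_imp _ _ h4)
  · exact pvRunN_succ_imp _ _ h4
  · exact h4

lemma pvWinC_step : ∀ (a : Char) (t : List Char), pvWinC (a :: t) = (pvRunN 4 (a :: t) || pvWinC t) := by
  intro a t
  match t with
  | b :: c :: d :: e :: rest => simp [pvWinC, pvRunN, Bool.and_assoc]
  | [] => simp [pvWinC, pvRunN]
  | [b] => simp [pvWinC, pvRunN]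
  | [b, c] => simp [pvWinC, pvRunN]
  | [b, c, d] => simp [pvWinC, pvRunN]

-- A's counting loop, with cnt pairs of credit, decides: a run completing within 4-cnt from the head, or a full window later.
lemma pvLoopA_eq : ∀ (l : List Char) (k : Nat), k ≤ 3 →
    pvLoopA l k = (pvRunN (4 - k) l || pvWinC l.tail) := by
  intro l
  induction l with
  | nil => intro k hk; interval_cases k <;> rfl
  | cons a t ih =>
    intro k hk
    match t with
    | [] => interval_cases k <;> rfl
    | b :: rest =>
      by_cases hp : ((b.toNat : Int) == (a.toNat : Int) + 1) = true
      · by_cases hk3 : k = 3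
        · subst hk3; simp [pvLoopA, hp, pvRunN]
        · have hk2 : k ≤ 2 := by omega
          have h1 : pvLoopA (a :: b :: rest) k = pvLoopA (b :: rest) (k + 1) := by
            simp only [pvLoopA, hp, if_true]
            have : ¬ (k + 1 ≥ 4) := by omega
            simp [this]
          have h2 := ih (k + 1) (by omega)
          have h43 : 4 - (k + 1) = 3 - k := by omega
          have h4k : 4 - k = (3 - k) + 1 := by omega
          rw [h1, h2, h43, h4k]
          show _ = (pvRunN ((3 - k) + 1) (a :: b :: rest) || pvWinC (b :: rest))
          have hw : pvWinC (b :: rest) = (pvRunN 4 (b :: rest) || pvWinC rest) := pvWinC_step b rest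
          simp only [pvRunN, hp, Bool.true_and, hw, List.tail_cons]
          by_cases h4 : pvRunN 4 (b :: rest) = true
          · have := pvRunN_four_imp (3 - k) (b :: rest) (by omega) h4
            simp [h4, this]
          · simp [Bool.not_eq_true] at h4
            simp [h4]
      · simp only [Bool.not_eq_true] at hp
        have h1 : pvLoopA (a :: b :: rest) k = pvLoopA (b :: rest) 0 := by
          simp [pvLoopA, hp]
        have h2 := ih 0 (by omega)
        have h4k : ∃ m, 4 - k = m + 1 := ⟨3 - k, by omega⟩
        obtain ⟨m, hm⟩ := h4k
        rw [h1, h2, hm]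
        show _ = (pvRunN (m + 1) (a :: b :: rest) || pvWinC (b :: rest))
        simp only [pvRunN, hp, Bool.false_and, Bool.false_or, List.tail_cons]
        rw [pvWinC_step b rest]


lemma pvLoopA_eq_winC : ∀ l : List Char, pvLoopA l 0 = pvWinC l := by
  intro l
  rw [pvLoopA_eq l 0 (by omega)]
  match l with
  | [] => rfl
  | a :: t => rw [List.tail_cons, ← pvWinC_step]

-- ===== VERDICT (by name: the statement is the Claim_ definition above) =====
theorem has_sequential_pattern_py_spec : Claim_equal_has_sequential_pattern_py := by
  intro text _
  unfold Spec_has_sequential_pattern_py has_sequential_pattern_py has_sequential_pattern_py_alt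
  by_cases h : PySem.Str.len text < 6
  · rw [if_pos h, if_pos h]
  · simp only [h, if_false]
    rw [show (((((text.toList.map (fun ch => (ch.toNat : Int))).zip ((text.toList.map (fun ch => (ch.toNat : Int))).drop 1)).zip ((text.toList.map (fun ch => (ch.toNat : Int))).drop 2)).zip ((text.toList.map (fun ch => (ch.toNat : Int))).drop 3)).zip ((text.toList.map (fun ch => (ch.toNat : Int))).drop 4)).any
      (fun q => (q.1.1.1.2 == q.1.1.1.1 + 1) && (q.1.1.2 == q.1.1.1.2 + 1)
              && (q.1.2 == q.1.1.2 + 1) && (q.2 == q.1.2 + 1)) = pvZip5Any (text.toList.map (fun ch => (ch.toNat : Int))) from rfl]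
    rw [pvZip5Any_eq_winI, pvWinC_eq_winI_map, pvLoopA_eq_winC]
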